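-- pv_equiv track=rewrite | github.com/ldolenc98/Multiplicador_Escolar | mult_escola_luciano.py | multiplica
-- ===== SOURCE A (Python) =====
-- def multiplica(multiplicador, multiplicando):
--
-- 	lista_multiplicador = []
-- 	lista_numeros = []
-- 	a = int(multiplicador)
-- 	b = int(multiplicando)
-- 	resultado = a*b
-- 	resultado = str(resultado)
-- 	multiplicador = str(multiplicador)
-- 	multiplicando = str(multiplicando)
-- 	for numero in multiplicador:
-- 		if numero != "-":
-- 			lista_multiplicador.append(int(numero))
--
-- 		else:
-- 			""
-- 	space_multiplicador = str(" ") * (len(resultado) - len(multiplicador) )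
-- 	space_multiplicando = str(" ") * (len(resultado) - len(multiplicando) + 2)
-- 	traco = "-" * (len(resultado) + 2)
-- 	i = 1
-- 	j = (len(lista_multiplicador) - 1)
-- 	while i < (len(lista_multiplicador) + 1):
-- 		numero = int(multiplicando) * lista_multiplicador[j]
-- 		if multiplicador[0] == "-" and not multiplicando[0] == "-":
-- 			numero = str(numero)
-- 			numero = "-" + numero
-- 		elif multiplicador[0] == "-" and multiplicando[0] == "-":
-- 			numero = str(numero)
-- 			numero = numero.replace("-", "")
-- 		else:
-- 			""
-- 		lista_numeros.append(numero)
-- 		j = j - 1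
-- 		i = i + 1
-- 	i = 0
-- 	string = ""
-- 	lista_numeros.append(0)
-- 	space = (len(traco) - len(str(lista_numeros[0])))
-- 	while i < (len(lista_multiplicador)):
-- 		if i == (len(lista_multiplicador)-1):
-- 			space =  space - 1
-- 			string = string + "+" + space * " " + str(lista_numeros[i]) + "\n"
-- 			i = i + 1
-- 		else:
-- 			string = string + space * " " + str(lista_numeros[i]) + "\n"
-- 			space = space - (len(str(lista_numeros[i+1])) - len(str(lista_numeros[i])) + 1)
-- 			i = i + 1
--
-- 	return  space_multiplicando + multiplicando + "\n" + "x " + space_multiplicador  + multiplicador + "\n" + traco + "\n" + string + traco + "\n" + "  " + resultado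
-- ===== SOURCE B (Python) =====
-- # B: a different decomposition — no digit list, no running-space accumulator.
-- # Digits are extracted arithmetically (n % 10, n // 10), which yields them
-- # LSB-first, exactly the order the lines are printed; the body is built by a
-- # single recursion over the integer, each line's indent a closed form in its
-- # index, and the both-negative partial product is abs() instead of .replace().
-- def multiplica(multiplicador, multiplicando):
--     a = int(multiplicador)
--     b = int(multiplicando)
--     resultado = str(a * b)
--     W = len(resultado) + 2
--     traco = '-' * W
--
--     def line(d, i, is_last):
--         pp = b * d
--         if a < 0 and b >= 0:
--             p = '-' + str(pp)
--         elif a < 0 and b < 0: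
--             p = str(abs(pp))
--         else:
--             p = str(pp)
--         if is_last:
--             return '+' + ' ' * (W - len(p) - i - 1) + p + '\n'
--         return ' ' * (W - len(p) - i) + p + '\n'
--
--     def body(n, i):
--         if n < 10:
--             return line(n, i, True)
--         return line(n % 10, i, False) + body(n // 10, i + 1)
--
--     sa = str(a)
--     sb = str(b)
--     header = (' ' * (len(resultado) - len(sb) + 2) + sb + '\n'
--               + 'x ' + ' ' * (len(resultado) - len(sa)) + sa + '\n')
--     return header + traco + '\n' + body(abs(a), 0) + traco + '\n' + '  ' + resultado
-- ===== Notes on version B (the rewrite author's own statement) =====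
-- stated objective: alternative
-- what changed: B never builds A's digit list or its running `space` accumulator: it recurses over the integer itself (n % 10, n // 10), which yields the digits LSB-first in exactly the printed order, computes each line's indent as a closed form of its index, and uses abs() for the both-negative partial product instead of str.replace.
import Mathlib
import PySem

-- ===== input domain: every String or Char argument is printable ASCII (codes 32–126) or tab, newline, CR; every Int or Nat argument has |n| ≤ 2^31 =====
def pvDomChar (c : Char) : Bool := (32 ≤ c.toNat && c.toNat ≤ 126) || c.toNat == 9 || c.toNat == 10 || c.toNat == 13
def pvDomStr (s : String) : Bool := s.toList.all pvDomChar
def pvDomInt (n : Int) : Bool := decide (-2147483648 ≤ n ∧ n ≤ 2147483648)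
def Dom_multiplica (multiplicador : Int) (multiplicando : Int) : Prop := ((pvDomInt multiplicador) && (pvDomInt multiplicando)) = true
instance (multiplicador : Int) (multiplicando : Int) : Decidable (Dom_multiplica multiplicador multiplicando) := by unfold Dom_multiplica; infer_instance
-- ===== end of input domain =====

-- B builds the body by a single recursion over the integer itself (n % 10, n // 10 — LSB-first,
-- the order the lines are printed), with closed-form indentation and abs() for the both-negative
-- case, instead of A's digit list, reversal loop and running `space` accumulator (objective:
-- alternative; same cost).

-- ===== PORT A =====
-- first while-loop: i counts 1..len(lm), j counts len(lm)-1..0, appending the rendered partial product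
-- (list entries are kept as their str() rendering: every later use of an entry is str()/len(str()))
def aLoop1 (b : Int) (sM sN : List Char) (lm : List Int) (i : Nat) (j : Int)
    (acc : List (List Char)) : List (List Char) :=
  if _h : i < lm.length + 1 then
    let numero : Int := b * ((PySem.List.pyGet? lm j).getD 0)  -- index is always in range when called as A calls it
    let s : List Char :=
      if (PySem.List.pyGet? sM 0 == some '-') && !(PySem.List.pyGet? sN 0 == some '-') then
        '-' :: PySem.Int.toChars numero
      else if (PySem.List.pyGet? sM 0 == some '-') && (PySem.List.pyGet? sN 0 == some '-') then
        PySem.Chars.replace (PySem.Int.toChars numero) ['-'] []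
      else PySem.Int.toChars numero
    aLoop1 b sM sN lm (i + 1) (j - 1) (acc ++ [s])
  else acc
termination_by lm.length + 1 - i
decreasing_by omega

-- second while-loop: builds the output block with the running `space` accumulator
def aLoop2 (lnums : List (List Char)) (n : Nat) (i : Nat) (space : Int) (string : List Char) : List Char :=
  if _h : i < n then
    if i = n - 1 then
      aLoop2 lnums n (i + 1) (space - 1)
        (string ++ ['+'] ++ PySem.List.pyRepeat [' '] (space - 1) ++ lnums.getD i [] ++ ['\n'])
    else
      aLoop2 lnums n (i + 1)
        (space - (((lnums.getD (i + 1) []).length : Int) - ((lnums.getD i []).length : Int) + 1))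
        (string ++ PySem.List.pyRepeat [' '] space ++ lnums.getD i [] ++ ['\n'])
  else string
termination_by n - i
decreasing_by all_goals omega

def multiplica (multiplicador : Int) (multiplicando : Int) : String :=
  let a := multiplicador
  let b := multiplicando
  let resultado := PySem.Int.toChars (a * b)
  let sM := PySem.Int.toChars multiplicador
  let sN := PySem.Int.toChars multiplicando
  -- int(c) for a digit char c of str(int) is exactly its code minus 48; '-' is filtered out
  let lm : List Int := sM.foldl (fun acc c => if c ≠ '-' then acc ++ [(c.toNat : Int) - 48] else acc) []
  let spaceM := PySem.List.pyRepeat [' '] ((resultado.length : Int) - (sM.length : Int))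
  let spaceN := PySem.List.pyRepeat [' '] ((resultado.length : Int) - (sN.length : Int) + 2)
  let traco := PySem.List.pyRepeat ['-'] ((resultado.length : Int) + 2)
  let lnums := aLoop1 b sM sN lm 1 ((lm.length : Int) - 1) []
  let lnums := lnums ++ [PySem.Int.toChars 0]   -- lista_numeros.append(0), stored as str()
  let space := (traco.length : Int) - ((lnums.headD []).length : Int)
  let string := aLoop2 lnums lm.length 0 space []
  String.ofList (spaceN ++ sN ++ ['\n'] ++ "x ".toList ++ spaceM ++ sM ++ ['\n'] ++ traco ++ ['\n']
    ++ string ++ traco ++ ['\n'] ++ "  ".toList ++ resultado)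

-- ===== PORT B =====
-- Source B's inner `line(d, i, is_last)` helper
def bLine (a b W : Int) (d : Int) (i : Int) (isLast : Bool) : List Char :=
  let pp := b * d
  let p : List Char :=
    if a < 0 ∧ 0 ≤ b then '-' :: PySem.Int.toChars pp
    else if a < 0 ∧ b < 0 then PySem.Int.toChars ((pp.natAbs : Int))   -- str(abs(pp))
    else PySem.Int.toChars pp
  if isLast then '+' :: (PySem.List.pyRepeat [' '] (W - (p.length : Int) - i - 1) ++ p ++ ['\n'])
  else PySem.List.pyRepeat [' '] (W - (p.length : Int) - i) ++ p ++ ['\n']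

-- Source B's inner `body(n, i)` recursion over the integer (digits LSB-first via % and //)
def bBody (a b W : Int) (n : Nat) (i : Int) : List Char :=
  if _h : n < 10 then bLine a b W (n : Int) i true
  else bLine a b W ((n % 10 : Nat) : Int) i false ++ bBody a b W (n / 10) (i + 1)
termination_by n
decreasing_by exact Nat.div_lt_self (by omega) (by omega)

def multiplica_alt (multiplicador : Int) (multiplicando : Int) : String :=
  let a := multiplicador
  let b := multiplicando
  let resultado := PySem.Int.toChars (a * b)
  let W : Int := (resultado.length : Int) + 2
  let traco := PySem.List.pyRepeat ['-'] W
  let sa := PySem.Int.toChars a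
  let sb := PySem.Int.toChars b
  let header := PySem.List.pyRepeat [' '] ((resultado.length : Int) - (sb.length : Int) + 2) ++ sb ++ ['\n']
    ++ "x ".toList ++ PySem.List.pyRepeat [' '] ((resultado.length : Int) - (sa.length : Int)) ++ sa ++ ['\n']
  String.ofList (header ++ traco ++ ['\n'] ++ bBody a b W a.natAbs 0 ++ traco ++ ['\n']
    ++ "  ".toList ++ resultado)

-- ===== PRECONDITION & SPEC =====
def Spec_multiplica (multiplicador : Int) (multiplicando : Int) (out : String) : Prop := out = multiplica_alt multiplicador multiplicando
instance (multiplicador : Int) (multiplicando : Int) (out : String) : Decidable (Spec_multiplica multiplicador multiplicando out) := by unfold Spec_multiplica; infer_instance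

-- ===== CLAIM (what is proved, stated in full; the proofs are below) =====
def Claim_equal_multiplica : Prop := ∀ (multiplicador : Int) (multiplicando : Int), Dom_multiplica multiplicador multiplicando → Spec_multiplica multiplicador multiplicando (multiplica multiplicador multiplicando)

-- ===== LEMMAS AND PROOFS =====

-- A's per-digit rendering (the body of its first loop) and per-line layout (second loop), as
-- named proof-side functions
def aRender (a b d : Int) : List Char :=
  if (PySem.List.pyGet? (PySem.Int.toChars a) 0 == some '-')
      && !(PySem.List.pyGet? (PySem.Int.toChars b) 0 == some '-') then
    '-' :: PySem.Int.toChars (b * d)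
  else if (PySem.List.pyGet? (PySem.Int.toChars a) 0 == some '-')
      && (PySem.List.pyGet? (PySem.Int.toChars b) 0 == some '-') then
    PySem.Chars.replace (PySem.Int.toChars (b * d)) ['-'] []
  else PySem.Int.toChars (b * d)

def aLine (W last i : Int) (p : List Char) : List Char :=
  if i = last then '+' :: (PySem.List.pyRepeat [' '] (W - (p.length : Int) - i - 1) ++ p)
  else PySem.List.pyRepeat [' '] (W - (p.length : Int) - i) ++ p

-- the digits of n, least-significant first (proof-side mirror of B's recursion)
def lsbDigits (n : Nat) : List Nat :=
  if _h : n < 10 then [n] else n % 10 :: lsbDigits (n / 10)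
termination_by n
decreasing_by exact Nat.div_lt_self (by omega) (by omega)

lemma lsbDigits_ne_nil (n : Nat) : lsbDigits n ≠ [] := by
  rw [lsbDigits]; split <;> simp

lemma digitChar_ne_dash (d : Nat) : Nat.digitChar d ≠ '-' := by
  by_cases h : d < 16
  · interval_cases d <;> decide
  · have h' : Nat.digitChar d = '*' := by
      unfold Nat.digitChar
      rw [if_neg (by omega), if_neg (by omega), if_neg (by omega), if_neg (by omega),
        if_neg (by omega), if_neg (by omega), if_neg (by omega), if_neg (by omega),
        if_neg (by omega), if_neg (by omega), if_neg (by omega), if_neg (by omega),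
        if_neg (by omega), if_neg (by omega), if_neg (by omega), if_neg (by omega)]
    rw [h']; decide

-- chars produced by Nat.toDigitsCore are digit chars or come from the accumulator
lemma mem_toDigitsCore (b : Nat) : ∀ (f n : Nat) (l : List Char) (c : Char),
    c ∈ Nat.toDigitsCore b f n l → c ∈ l ∨ ∃ d, c = Nat.digitChar d := by
  intro f
  induction f with
  | zero => intro n l c h; exact Or.inl (by simpa [Nat.toDigitsCore] using h)
  | succ f ih =>
    intro n l c h
    simp only [Nat.toDigitsCore] at h
    split at h
    · rcases List.mem_cons.mp h with h | h
      · exact Or.inr ⟨_, h⟩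
      · exact Or.inl h
    · rcases ih _ _ _ h with h | h
      · rcases List.mem_cons.mp h with h | h
        · exact Or.inr ⟨_, h⟩
        · exact Or.inl h
      · exact Or.inr h

lemma dash_not_mem_toDigits (n : Nat) : '-' ∉ Nat.toDigits 10 n := by
  intro hm
  rcases mem_toDigitsCore 10 _ _ _ _ hm with hc | ⟨d, hd⟩
  · simp at hc
  · exact digitChar_ne_dash d hd.symm

-- the sign test 's[0] == "-"' on s = str(n) is exactly 'n < 0'
lemma signChar (n : Int) : (PySem.List.pyGet? (PySem.Int.toChars n) 0 == some '-') = decide (n < 0) := by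
  by_cases h : n < 0
  · simp [PySem.Int.toChars, h]
  · simp only [PySem.Int.toChars, if_neg h]
    cases hg : PySem.List.pyGet? (Nat.toDigits 10 n.toNat) 0 with
    | none => simp [h]
    | some c =>
      have hc : c ∈ Nat.toDigits 10 n.toNat := PySem.List.mem_of_pyGet?_eq_some _ hg
      have hne : c ≠ '-' := fun hceq => dash_not_mem_toDigits n.toNat (hceq ▸ hc)
      simp [h, hne]

-- str(n).replace('-','') = str(abs(n))
lemma replace_go_no_dash : ∀ (l : List Char), '-' ∉ l → ∀ (fuel : Nat), l.length ≤ fuel →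
    ∀ (acc : List Char), PySem.Chars.replace.go ['-'] [] fuel l acc = acc.reverse ++ l := by
  intro l
  induction l with
  | nil =>
    intro _ fuel _ acc
    cases fuel <;> simp [PySem.Chars.replace.go]
  | cons c t ih =>
    intro hm fuel hf acc
    obtain ⟨f, rfl⟩ : ∃ f, fuel = f + 1 := ⟨fuel - 1, by simp at hf; omega⟩
    have hc : c ≠ '-' := fun h => hm (h ▸ List.mem_cons_self)
    have hpre : List.isPrefixOf ['-'] (c :: t) = false := by
      simp [List.isPrefixOf, hc.symm]
    rw [PySem.Chars.replace.go]
    simp only [hpre]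
    rw [if_neg (by simp)]
    rw [ih (fun h => hm (List.mem_cons_of_mem _ h)) f (by simp at hf; omega) (c :: acc)]
    simp

lemma replace_dash_toChars (n : Int) :
    PySem.Chars.replace (PySem.Int.toChars n) ['-'] [] = PySem.Int.toChars ((n.natAbs : Int)) := by
  by_cases h : n < 0
  · have : PySem.Int.toChars n = '-' :: Nat.toDigits 10 n.natAbs := by
      simp [PySem.Int.toChars, h]
    rw [this, PySem.Chars.replace]
    rw [if_neg (by simp)]
    rw [PySem.Chars.replace.go.eq_def]
    simp only [List.length_cons]
    rw [if_pos (by simp [List.isPrefixOf])]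
    have hdrop : List.drop (([] : List Char).length + 1) ('-' :: Nat.toDigits 10 n.natAbs)
        = Nat.toDigits 10 n.natAbs := by simp
    rw [hdrop]
    simp only [List.reverse_nil, List.nil_append]
    rw [replace_go_no_dash _ (dash_not_mem_toDigits _) _ (le_refl _) []]
    simp only [List.reverse_nil, List.nil_append]
    rw [PySem.Int.toChars, if_neg (by omega)]
    simp
    congr 1
    rw [Int.abs_eq_natAbs, Int.toNat_natCast]
  · have h0 : (0 : Int) ≤ n := by omega
    have : PySem.Int.toChars n = Nat.toDigits 10 n.natAbs := by
      rw [PySem.Int.toChars, if_neg h]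
      congr 1
      omega
    rw [this, PySem.Chars.replace]
    rw [if_neg (by simp)]
    rw [replace_go_no_dash _ (dash_not_mem_toDigits _) _ (le_refl _) []]
    simp only [List.reverse_nil, List.nil_append]
    rw [PySem.Int.toChars, if_neg (by omega)]
    simp
    congr 1
    rw [Int.abs_eq_natAbs, Int.toNat_natCast]

-- Nat.toDigits is the reversed LSB digit list rendered with digitChar
lemma toDigitsCore_eq_lsb : ∀ (n : Nat) (fuel : Nat), n < fuel → ∀ (l : List Char),
    Nat.toDigitsCore 10 fuel n l = ((lsbDigits n).reverse.map Nat.digitChar) ++ l := by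
  intro n
  induction n using Nat.strong_induction_on with
  | _ n ih =>
    intro fuel hf l
    obtain ⟨f, rfl⟩ : ∃ f, fuel = f + 1 := ⟨fuel - 1, by omega⟩
    rw [Nat.toDigitsCore, lsbDigits]
    by_cases h : n < 10
    · rw [if_pos (by omega), dif_pos h]
      have : n % 10 = n := Nat.mod_eq_of_lt h
      simp [this]
    · rw [if_neg (by omega), dif_neg h]
      rw [ih (n / 10) (Nat.div_lt_self (by omega) (by omega)) f
        (by have := Nat.div_lt_self (show 0 < n by omega) (show 1 < 10 by omega); omega)]
      simp

lemma toDigits_eq_lsb (n : Nat) :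
    Nat.toDigits 10 n = (lsbDigits n).reverse.map Nat.digitChar := by
  have := toDigitsCore_eq_lsb n (n + 1) (by omega) []
  simpa [Nat.toDigits] using this

lemma lsbDigits_lt (n : Nat) : ∀ d ∈ lsbDigits n, d < 10 := by
  induction n using Nat.strong_induction_on with
  | _ n ih =>
    intro d hd
    rw [lsbDigits] at hd
    by_cases h : n < 10
    · rw [dif_pos h] at hd; simp at hd; omega
    · rw [dif_neg h] at hd
      rcases List.mem_cons.mp hd with rfl | hd
      · exact Nat.mod_lt _ (by omega)
      · exact ih (n / 10) (Nat.div_lt_self (by omega) (by omega)) d hd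

lemma digitChar_val (d : Nat) (h : d < 10) : ((Nat.digitChar d).toNat : Int) - 48 = (d : Int) := by
  interval_cases d <;> decide

-- the digit list A extracts from str(a) is the reversed LSB digit list of |a|
lemma lm_eq_lsb (a : Int) :
    (List.filter (fun c => decide (c ≠ '-')) (PySem.Int.toChars a)).map (fun c => ((c.toNat : Int)) - 48)
      = (lsbDigits a.natAbs).reverse.map (fun (d : Nat) => (d : Int)) := by
  have hfilter : List.filter (fun c => decide (c ≠ '-')) (Nat.toDigits 10 a.natAbs)
      = Nat.toDigits 10 a.natAbs :=
    List.filter_eq_self.mpr (fun c hc => by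
      have hnd := dash_not_mem_toDigits a.natAbs
      simp only [ne_eq, decide_eq_true_eq]
      rintro rfl
      exact hnd hc)
  have hbase : (Nat.toDigits 10 a.natAbs).map (fun c => ((c.toNat : Int)) - 48)
      = (lsbDigits a.natAbs).reverse.map (fun (d : Nat) => (d : Int)) := by
    rw [toDigits_eq_lsb, List.map_map]
    simp only [Function.comp_def]
    exact List.map_congr_left (fun d hd =>
      digitChar_val d (lsbDigits_lt a.natAbs d (List.mem_reverse.mp hd)))
  by_cases h : a < 0
  · have : PySem.Int.toChars a = '-' :: Nat.toDigits 10 a.natAbs := by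
      simp [PySem.Int.toChars, h]
    rw [this, List.filter_cons_of_neg (by decide)]
    rw [hfilter, hbase]
  · have : PySem.Int.toChars a = Nat.toDigits 10 a.natAbs := by
      rw [PySem.Int.toChars, if_neg h]
      congr 1
      omega
    rw [this, hfilter, hbase]

-- A's first while-loop is a map over the reversed prefix of the digit list
lemma aLoop1_eq (b : Int) (sM sN : List Char) (lm : List Int) :
    ∀ (m : Nat) (acc : List (List Char)), m ≤ lm.length →
      aLoop1 b sM sN lm (lm.length + 1 - m) ((m : Int) - 1) acc
        = acc ++ ((lm.take m).reverse.map (fun d =>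
            if (PySem.List.pyGet? sM 0 == some '-') && !(PySem.List.pyGet? sN 0 == some '-') then
              '-' :: PySem.Int.toChars (b * d)
            else if (PySem.List.pyGet? sM 0 == some '-') && (PySem.List.pyGet? sN 0 == some '-') then
              PySem.Chars.replace (PySem.Int.toChars (b * d)) ['-'] []
            else PySem.Int.toChars (b * d))) := by
  intro m
  induction m with
  | zero =>
    intro acc _
    rw [aLoop1]
    simp
  | succ m ih =>
    intro acc hm
    rw [aLoop1]
    rw [dif_pos (by omega)]
    have hidx : PySem.List.pyGet? lm ((↑(m + 1) : Int) - 1) = some lm[m] := by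
      rw [show ((↑(m + 1) : Int) - 1) = ((m : Nat) : Int) by push_cast; omega]
      rw [PySem.List.pyGet?_natCast]
      exact List.getElem?_eq_getElem (by omega)
    have hstep : lm.length + 1 - (m + 1) + 1 = lm.length + 1 - m := by omega
    have hj : ((↑(m + 1) : Int) - 1 - 1) = ((m : Nat) : Int) - 1 := by push_cast; omega
    simp only [hidx, Option.getD_some, hstep, hj]
    rw [ih _ (by omega)]
    have htake : lm.take (m + 1) = lm.take m ++ [lm[m]] := by
      rw [List.take_add_one, List.getElem?_eq_getElem (by omega)]; rfl
    rw [htake, List.reverse_append]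
    simp only [List.reverse_cons, List.reverse_nil, List.nil_append, List.map_cons,
      List.cons_append, List.append_assoc]

-- A's second while-loop, from position i with the invariant space = W - len(pps[i]) - i,
-- emits exactly the closed-form lines for the remaining suffix
lemma aLoop2_eq (W : Int) (pps : List (List Char)) (z : List Char) :
    ∀ (ps : List (List Char)) (i : Nat) (space : Int) (acc : List Char),
      pps.drop i = ps →
      (∀ p, ps.head? = some p → space = W - (p.length : Int) - (i : Int)) →
      aLoop2 (pps ++ [z]) pps.length i space acc
        = acc ++ ((PySem.List.enumerate ps (i : Int)).map
            (fun ip => aLine W ((pps.length : Int) - 1) ip.1 ip.2 ++ ['\n'])).flatten := by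
  intro ps
  induction ps with
  | nil =>
    intro i space acc hdrop _
    have hlen : pps.length ≤ i := by
      have := congrArg List.length hdrop
      simp [List.length_drop] at this; omega
    rw [aLoop2, dif_neg (by omega)]
    simp [PySem.List.enumerate]
  | cons p ps' ih =>
    intro i space acc hdrop hsp
    have hi : i < pps.length := by
      have := congrArg List.length hdrop
      simp [List.length_drop] at this; omega
    have hcur : (pps ++ [z]).getD i [] = p := by
      have h0 : pps[i]? = some p := by
        have : (pps.drop i)[0]? = some p := by rw [hdrop]; rfl
        simpa [List.getElem?_drop] using this
      rw [List.getD_eq_getElem?_getD, List.getElem?_append_left hi, h0]; rfl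
    have hspace : space = W - (p.length : Int) - (i : Int) := hsp p rfl
    rw [aLoop2, dif_pos hi]
    by_cases hlast : i = pps.length - 1
    · -- last line: ps' is empty
      have hps' : ps' = [] := by
        have := congrArg List.length hdrop
        simp [List.length_drop] at this
        exact List.eq_nil_of_length_eq_zero (by omega)
      subst hps'
      rw [if_pos hlast, hcur]
      rw [aLoop2, dif_neg (by omega)]
      have hbl : aLine W ((pps.length : Int) - 1) (i : Int) p
          = '+' :: (PySem.List.pyRepeat [' '] (W - (p.length : Int) - (i : Int) - 1) ++ p) := by
        rw [aLine, if_pos (by omega)]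
      simp [PySem.List.enumerate, hbl, hspace, List.append_assoc]
    · -- not the last line
      rw [if_neg hlast]
      have hi1 : i + 1 < pps.length := by omega
      have hdrop' : pps.drop (i + 1) = ps' := by
        have : (pps.drop i).tail = ps' := by rw [hdrop]; rfl
        simpa [List.tail_drop] using this
      have hps'ne : ps' ≠ [] := by
        have := congrArg List.length hdrop'
        simp [List.length_drop] at this
        intro hnil; rw [hnil] at this; simp at this; omega
      obtain ⟨q, ps'', rfl⟩ := List.exists_cons_of_ne_nil hps'ne
      have hnxt : (pps ++ [z]).getD (i + 1) [] = q := by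
        have h0 : pps[i+1]? = some q := by
          have : (pps.drop (i+1))[0]? = some q := by rw [hdrop']; rfl
          simpa [List.getElem?_drop] using this
        rw [List.getD_eq_getElem?_getD, List.getElem?_append_left hi1, h0]; rfl
      rw [hcur, hnxt]
      rw [ih (i + 1) _ _ hdrop' (by
        intro r hr
        simp at hr
        subst hr
        rw [hspace]; push_cast; ring)]
      have hbl : aLine W ((pps.length : Int) - 1) (i : Int) p
          = PySem.List.pyRepeat [' '] (W - (p.length : Int) - (i : Int)) ++ p := by
        rw [aLine, if_neg (by omega)]
      rw [PySem.List.enumerate_cons]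
      simp [hbl, hspace, List.append_assoc]

-- B's line for a non-negative digit is A's rendering laid out with A's line function
lemma bLine_eq_aLine (a b W : Int) (d : Nat) (i last : Int) :
    bLine a b W (d : Int) i (decide (i = last))
      = aLine W last i (aRender a b (d : Int)) ++ ['\n'] := by
  have hrender : (if a < 0 ∧ 0 ≤ b then '-' :: PySem.Int.toChars (b * (d : Int))
      else if a < 0 ∧ b < 0 then PySem.Int.toChars (((b * (d : Int)).natAbs : Int))
      else PySem.Int.toChars (b * (d : Int))) = aRender a b (d : Int) := by
    rw [aRender, signChar a, signChar b, ← replace_dash_toChars]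
    by_cases ha : a < 0 <;> by_cases hb : b < 0 <;>
      simp [ha, hb, Int.not_lt.mp]
  rw [bLine, aLine]
  simp only [hrender]
  by_cases h : i = last <;> simp [h, List.append_assoc]

-- B's recursion over n emits the closed-form lines of the LSB digit list of n
lemma bBody_eq (a b W : Int) : ∀ (n : Nat) (i : Int),
    bBody a b W n i
      = ((PySem.List.enumerate ((lsbDigits n).map (fun (d : Nat) => aRender a b (d : Int))) i).map
          (fun ip => aLine W (i + ((lsbDigits n).length : Int) - 1) ip.1 ip.2 ++ ['\n'])).flatten := by
  intro n
  induction n using Nat.strong_induction_on with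
  | _ n ih =>
    intro i
    rw [bBody, lsbDigits]
    by_cases h : n < 10
    · rw [dif_pos h, dif_pos h]
      have := bLine_eq_aLine a b W n i i
      simp only [List.length_cons, List.length_nil] at *
      simp [PySem.List.enumerate_cons, PySem.List.enumerate]
      simpa using this
    · rw [dif_neg h, dif_neg h]
      have hlt : n / 10 < n := Nat.div_lt_self (by omega) (by omega)
      rw [ih (n / 10) hlt (i + 1)]
      have hlen : ((lsbDigits (n / 10)).length : Int) ≥ 1 := by
        have h1 := lsbDigits_ne_nil (n / 10)
        have h2 : (lsbDigits (n / 10)).length ≥ 1 :=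
          Nat.one_le_iff_ne_zero.mpr (by simpa [List.length_eq_zero_iff] using h1)
        exact_mod_cast h2
      have hline := bLine_eq_aLine a b W (n % 10) i
        (i + 1 + ((lsbDigits (n / 10)).length : Int) - 1)
      rw [show (decide (i = i + 1 + ((lsbDigits (n / 10)).length : Int) - 1)) = false by
        simp; omega] at hline
      simp only [List.map_cons, PySem.List.enumerate_cons, List.map_cons, List.flatten_cons,
        List.length_cons, Nat.cast_add, Nat.cast_one]
      rw [show i + (((lsbDigits (n / 10)).length : Int) + 1) - 1
          = i + 1 + ((lsbDigits (n / 10)).length : Int) - 1 by ring]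
      rw [hline]

lemma multiplica_eq_alt (a b : Int) : multiplica a b = multiplica_alt a b := by
  unfold multiplica multiplica_alt
  simp only
  set lm := List.map (fun c => ((c.toNat : Int)) - 48)
      (List.filter (fun c => decide (c ≠ '-')) (PySem.Int.toChars a)) with hlm
  have hfold : List.foldl (fun acc c => if c ≠ '-' then acc ++ [((c.toNat : Int)) - 48] else acc) []
      (PySem.Int.toChars a) = lm := by
    rw [hlm]
    simpa using PySem.List.foldl_append_ite (fun c => c ≠ '-') (fun c => ((c.toNat : Int)) - 48)
      (PySem.Int.toChars a) []
  rw [hfold]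
  have hlmv : lm = (lsbDigits a.natAbs).reverse.map (fun (d : Nat) => (d : Int)) := by
    rw [hlm, lm_eq_lsb]
  have hloop1 : aLoop1 b (PySem.Int.toChars a) (PySem.Int.toChars b) lm 1 ((lm.length : Int) - 1) []
      = List.map (fun d => aRender a b d) lm.reverse := by
    have h := aLoop1_eq b (PySem.Int.toChars a) (PySem.Int.toChars b) lm lm.length [] (le_refl _)
    rw [show lm.length + 1 - lm.length = 1 by omega] at h
    rw [h, List.take_length]
    rfl
  rw [hloop1]
  set pps := List.map (fun d => aRender a b d) lm.reverse with hpps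
  set z := PySem.Int.toChars 0 with hz
  set W := (((PySem.Int.toChars (a * b)).length : Int)) + 2 with hW
  rw [show lm.length = pps.length by simp [hpps]]
  have hsp : ∀ p, pps.head? = some p →
      ((PySem.List.pyRepeat ['-'] W).length : Int) - (((pps ++ [z]).headD []).length : Int)
        = W - (p.length : Int) - ((0 : Nat) : Int) := by
    intro p hp
    cases hpp : pps with
    | nil => rw [hpp] at hp; simp at hp
    | cons x t =>
      rw [hpp] at hp
      simp at hp
      subst hp
      simp
      rw [hW]
      omega
  rw [aLoop2_eq W pps z pps 0 _ [] List.drop_zero (hsp)]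
  have hppslsb : pps = (lsbDigits a.natAbs).map (fun (d : Nat) => aRender a b (d : Int)) := by
    rw [hpps, hlmv, ← List.map_reverse, List.reverse_reverse, List.map_map]
    simp [Function.comp_def]
  have hbody : bBody a b W a.natAbs 0
      = ((PySem.List.enumerate pps ((0 : Nat) : Int)).map
          (fun ip => aLine W ((pps.length : Int) - 1) ip.1 ip.2 ++ ['\n'])).flatten := by
    rw [bBody_eq a b W a.natAbs 0, hppslsb]
    norm_num
  rw [← hbody]
  simp only [List.nil_append, List.append_assoc]

-- ===== VERDICT (by name: the statement is the Claim_ definition above) =====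
theorem multiplica_spec : Claim_equal_multiplica := by
  intro a b _
  exact multiplica_eq_alt a b
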